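-- pv_equiv track=rewrite | github.com/2gis/vmmaster-frontend | api/views.py | _response_step
-- ===== SOURCE A (Python) =====
-- def _response_step(request, steps):
--     response = None
--     for num, step in enumerate(iter(steps)):
--         if step == request:
--             try:
--                 response = steps[num+1]
--             except IndexError:
--                 response = None
--
--     return response
-- ===== SOURCE B (Python) =====
-- def _response_step(request, steps):
--     for i in range(len(steps) - 1, -1, -1):
--         if steps[i] == request:
--             return steps[i + 1] if i + 1 < len(steps) else None
--     return None
-- ===== Notes on version B (the rewrite author's own statement) =====
-- stated objective: simpler
-- what changed: Scans the list in reverse and returns on the first match (the successor of the last matching step), instead of a full forward pass that keeps overwriting an accumulator.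
import Mathlib
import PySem

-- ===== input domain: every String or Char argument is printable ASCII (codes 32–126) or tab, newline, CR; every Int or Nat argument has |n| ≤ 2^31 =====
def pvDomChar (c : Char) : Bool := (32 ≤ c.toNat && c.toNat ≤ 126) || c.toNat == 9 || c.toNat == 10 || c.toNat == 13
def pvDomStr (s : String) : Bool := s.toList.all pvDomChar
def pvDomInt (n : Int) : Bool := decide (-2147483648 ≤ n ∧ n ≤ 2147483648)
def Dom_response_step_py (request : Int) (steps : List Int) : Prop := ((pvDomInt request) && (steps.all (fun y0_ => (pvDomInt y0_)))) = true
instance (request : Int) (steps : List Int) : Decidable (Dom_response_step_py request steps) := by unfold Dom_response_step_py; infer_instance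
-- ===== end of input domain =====

-- B replaces A's forward pass (accumulator overwritten at every match) by a reverse scan
-- returning at the first match; same return value, no side effects involved.

-- ===== PORT A =====
-- for num, step in enumerate(steps): if step == request: response = steps[num+1] (IndexError -> None)
def response_step_py (request : Int) (steps : List Int) : Option Int :=
  (PySem.List.enumerate steps).foldl
    (fun resp p => if p.2 = request then PySem.List.pyGet? steps (p.1 + 1) else resp) none

-- ===== PORT B =====
-- for i in range(len(steps)-1, -1, -1): if steps[i] == request: return steps[i+1] if in range else None
-- fuel = i+1; responseStepAltGo (n+1) inspects index n and counts down.
def responseStepAltGo (request : Int) (steps : List Int) : Nat → Option Int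
  | 0 => none
  | n+1 =>
    if steps.getD n 0 = request then
      (if n + 1 < steps.length then some (steps.getD (n+1) 0) else none)
    else responseStepAltGo request steps n

def response_step_py_alt (request : Int) (steps : List Int) : Option Int :=
  responseStepAltGo request steps steps.length

-- ===== PRECONDITION & SPEC =====
def Spec_response_step_py (request : Int) (steps : List Int) (out : Option Int) : Prop := out = response_step_py_alt request steps
instance (request : Int) (steps : List Int) (out : Option Int) : Decidable (Spec_response_step_py request steps out) := by unfold Spec_response_step_py; infer_instance

-- ===== CLAIM =====
def Claim_equal_response_step_py : Prop := ∀ (request : Int) (steps : List Int), Dom_response_step_py request steps → Spec_response_step_py request steps (response_step_py request steps)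

-- ===== LEMMAS AND PROOFS =====

-- A's fold body, generalized over the pair list and the accumulator.
def pvFoldA (request : Int) (steps : List Int) (pairs : List (Int × Int)) (init : Option Int) : Option Int :=
  pairs.foldl (fun resp p => if p.2 = request then PySem.List.pyGet? steps (p.1 + 1) else resp) init

theorem pvFoldA_append_single (request : Int) (steps : List Int) (l : List (Int × Int)) (q : Int × Int) (init : Option Int) :
    pvFoldA request steps (l ++ [q]) init =
      (if q.2 = request then PySem.List.pyGet? steps (q.1 + 1) else pvFoldA request steps l init) := by
  simp [pvFoldA]

theorem pvAltGo_none (request : Int) (steps : List Int) (n : Nat) (hn : n ≤ steps.length)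
    (h : request ∉ steps.take n) : responseStepAltGo request steps n = none := by
  induction n with
  | zero => simp [responseStepAltGo]
  | succ m ih =>
    have hm : m < steps.length := by omega
    have htake : steps.take (m+1) = steps.take m ++ [steps[m]] := by
      rw [List.take_succ, List.getElem?_eq_getElem hm]; rfl
    have h1 : request ∉ steps.take m := fun hc => h (htake ▸ List.mem_append_left _ hc)
    have h2 : steps.getD m 0 ≠ request := by
      rw [List.getD_eq_getElem steps 0 hm]
      intro he
      exact h (htake ▸ List.mem_append_right _ (by simp [he]))
    simp only [responseStepAltGo, if_neg h2]
    exact ih (by omega) h1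

theorem pvFoldA_take (request : Int) (steps : List Int) (init : Option Int) (n : Nat) (hn : n ≤ steps.length) :
    pvFoldA request steps (PySem.List.enumerate (steps.take n)) init =
      (if request ∈ steps.take n then responseStepAltGo request steps n else init) := by
  induction n with
  | zero => simp [pvFoldA, PySem.List.enumerate]
  | succ m ih =>
    have hm : m < steps.length := by omega
    have htake : steps.take (m+1) = steps.take m ++ [steps[m]] := by
      rw [List.take_succ, List.getElem?_eq_getElem hm]; rfl
    have hlen : (steps.take m).length = m := by rw [List.length_take]; omega
    rw [htake, PySem.List.enumerate_append, hlen]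
    simp only [PySem.List.enumerate_cons, PySem.List.enumerate_nil]
    rw [pvFoldA_append_single]
    by_cases hx : steps[m] = request
    · rw [if_pos hx, if_pos (List.mem_append_right _ (by simp [hx]))]
      have hgd : steps.getD m 0 = request := by rw [List.getD_eq_getElem steps 0 hm]; exact hx
      simp only [responseStepAltGo, if_pos hgd]
      have hcast : (0 : Int) + (m : Int) + 1 = ((m + 1 : Nat) : Int) := by push_cast; ring
      rw [hcast, PySem.List.pyGet?_natCast]
      by_cases hlt : m + 1 < steps.length
      · rw [if_pos hlt, List.getElem?_eq_getElem hlt, List.getD_eq_getElem steps 0 hlt]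
      · rw [if_neg hlt, List.getElem?_eq_none_iff.mpr (by omega)]
    · rw [if_neg hx, ih (by omega)]
      have hgd : steps.getD m 0 ≠ request := by rw [List.getD_eq_getElem steps 0 hm]; exact hx
      have hgo : responseStepAltGo request steps (m+1) = responseStepAltGo request steps m := by
        simp only [responseStepAltGo, if_neg hgd]
      by_cases hr : request ∈ steps.take m
      · rw [if_pos hr, if_pos (List.mem_append_left _ hr), hgo]
      · have hno : request ∉ steps.take m ++ [steps[m]] := by
          intro hc
          rcases List.mem_append.mp hc with h' | h'
          · exact hr h'
          · simp at h'; exact hx h'.symm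
        rw [if_neg hr, if_neg hno]

-- ===== VERDICT =====
theorem response_step_py_spec : Claim_equal_response_step_py := by
  intro request steps _
  unfold Spec_response_step_py response_step_py response_step_py_alt
  have h := pvFoldA_take request steps none steps.length (le_refl _)
  rw [List.take_length] at h
  rw [show (PySem.List.enumerate steps).foldl
      (fun resp p => if p.2 = request then PySem.List.pyGet? steps (p.1 + 1) else resp) none
      = pvFoldA request steps (PySem.List.enumerate steps) none from rfl, h]
  by_cases hmem : request ∈ steps
  · simp [hmem]
  · simp [hmem, pvAltGo_none request steps steps.length (le_refl _) (by simpa using hmem)]
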